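-- pv_equiv track=rewrite | github.com/rollingstorms/groggy | python/groggy/analysis.py | _compare_graph_states
-- ===== SOURCE A (Python) =====
-- from typing import Optional, Dict, List, Any, Union
--
-- def _compare_graph_states(prev_nodes: Dict, prev_edges: Dict, curr_nodes: Dict, curr_edges: Dict) -> Dict:
--     """Compare two graph states and return the differences."""
--
--     # Node changes
--     prev_node_ids = set(prev_nodes.keys())
--     curr_node_ids = set(curr_nodes.keys())
--
--     nodes_added = list(curr_node_ids - prev_node_ids)
--     nodes_removed = list(prev_node_ids - curr_node_ids)
--     nodes_modified = []
--
--     # Check for modified nodes (same ID, different attributes)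
--     for node_id in prev_node_ids & curr_node_ids:
--         if prev_nodes[node_id] != curr_nodes[node_id]:
--             nodes_modified.append(node_id)
--
--     # Edge changes
--     prev_edge_ids = set(prev_edges.keys())
--     curr_edge_ids = set(curr_edges.keys())
--
--     edges_added = list(curr_edge_ids - prev_edge_ids)
--     edges_removed = list(prev_edge_ids - curr_edge_ids)
--     edges_modified = []
--
--     # Check for modified edges (same ID, different attributes or endpoints)
--     for edge_id in prev_edge_ids & curr_edge_ids:
--         if prev_edges[edge_id] != curr_edges[edge_id]:
--             edges_modified.append(edge_id)
--
--     return {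
--         'nodes_added': sorted(nodes_added),
--         'nodes_removed': sorted(nodes_removed),
--         'nodes_modified': sorted(nodes_modified),
--         'edges_added': sorted(edges_added),
--         'edges_removed': sorted(edges_removed),
--         'edges_modified': sorted(edges_modified)
--     }
-- ===== SOURCE B (Python) =====
-- def _compare_graph_states(prev_nodes, prev_edges, curr_nodes, curr_edges):
--     """Compare two graph states via sorted-key two-pointer merge (no set algebra, no final sorts)."""
--     def merge_diff(prev, curr):
--         pk, ck = sorted(prev), sorted(curr)
--         added, removed, modified = [], [], []
--         i = j = 0
--         while i < len(pk) and j < len(ck):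
--             if pk[i] < ck[j]:
--                 removed.append(pk[i])
--                 i += 1
--             elif ck[j] < pk[i]:
--                 added.append(ck[j])
--                 j += 1
--             else:
--                 if prev[pk[i]] != curr[ck[j]]:
--                     modified.append(pk[i])
--                 i += 1
--                 j += 1
--         removed.extend(pk[i:])
--         added.extend(ck[j:])
--         return added, removed, modified
--
--     na, nr, nm = merge_diff(prev_nodes, curr_nodes)
--     ea, er, em = merge_diff(prev_edges, curr_edges)
--     return {
--         'nodes_added': na,
--         'nodes_removed': nr,
--         'nodes_modified': nm,
--         'edges_added': ea,
--         'edges_removed': er,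
--         'edges_modified': em
--     }
-- ===== Notes on version B (the rewrite author's own statement) =====
-- stated objective: alternative
-- what changed: Replaces A's per-category set algebra followed by six sorts with a sort-then-merge algorithm: each dict's keys are sorted once and a two-pointer merge of the two sorted key lists emits added/removed/modified directly in sorted order, so no set operations, membership tests or final sorts remain.
import Mathlib
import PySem

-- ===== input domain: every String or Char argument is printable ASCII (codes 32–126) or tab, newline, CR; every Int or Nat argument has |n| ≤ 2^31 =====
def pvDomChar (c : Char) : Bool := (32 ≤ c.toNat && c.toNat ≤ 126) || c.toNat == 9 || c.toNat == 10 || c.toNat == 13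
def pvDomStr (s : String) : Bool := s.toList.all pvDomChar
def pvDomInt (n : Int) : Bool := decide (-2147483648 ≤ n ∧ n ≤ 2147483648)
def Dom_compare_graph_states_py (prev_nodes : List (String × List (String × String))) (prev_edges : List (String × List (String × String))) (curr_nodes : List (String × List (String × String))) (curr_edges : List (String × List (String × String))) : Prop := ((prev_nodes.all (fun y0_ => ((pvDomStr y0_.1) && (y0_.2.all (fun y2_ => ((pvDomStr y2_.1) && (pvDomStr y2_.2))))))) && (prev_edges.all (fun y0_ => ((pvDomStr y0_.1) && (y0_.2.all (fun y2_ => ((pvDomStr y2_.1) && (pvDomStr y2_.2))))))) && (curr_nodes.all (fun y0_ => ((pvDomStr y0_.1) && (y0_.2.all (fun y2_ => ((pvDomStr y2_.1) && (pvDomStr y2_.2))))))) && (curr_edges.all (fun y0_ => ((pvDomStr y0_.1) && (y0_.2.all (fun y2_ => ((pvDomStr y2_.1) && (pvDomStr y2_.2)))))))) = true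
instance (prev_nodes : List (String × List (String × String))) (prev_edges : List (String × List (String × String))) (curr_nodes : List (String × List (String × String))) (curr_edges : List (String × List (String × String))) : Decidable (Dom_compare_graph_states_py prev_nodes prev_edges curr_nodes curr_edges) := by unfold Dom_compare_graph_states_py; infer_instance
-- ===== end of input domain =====

-- ===== PORT A =====
-- B re-implements A by a sort-then-merge algorithm: keys sorted once, a two-pointer merge of the
-- two sorted key lists emits added/removed/modified already in sorted order (objective: alternative).
-- Python's `!=` on the attribute dicts ignores insertion order: both ports compare via pyAttrNe (key set + per-key lookup).
def pyAttrNe (v w : List (String × String)) : Bool :=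
  let d1 := PySem.Dict.ofList v
  let d2 := PySem.Dict.ofList w
  !(d1.keys.all (fun k => d2.contains k) && d2.keys.all (fun k => d1.contains k) &&
    d1.keys.all (fun k => d1.get? k == d2.get? k))

def compare_graph_states_py (prev_nodes : List (String × List (String × String))) (prev_edges : List (String × List (String × String))) (curr_nodes : List (String × List (String × String))) (curr_edges : List (String × List (String × String))) : List (String × List String) :=
  let prevN := PySem.Dict.ofList prev_nodes
  let currN := PySem.Dict.ofList curr_nodes
  let prev_node_ids : PySem.Set String := PySem.Set.ofList prevN.keys
  let curr_node_ids : PySem.Set String := PySem.Set.ofList currN.keys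
  let nodes_added : List String := PySem.Set.diff curr_node_ids prev_node_ids
  let nodes_removed : List String := PySem.Set.diff prev_node_ids curr_node_ids
  let nodes_modified : List String :=
    (PySem.Set.inter prev_node_ids curr_node_ids).foldl
      (fun acc node_id =>
        if pyAttrNe (prevN.getD node_id []) (currN.getD node_id []) then acc ++ [node_id] else acc) []
  let prevE := PySem.Dict.ofList prev_edges
  let currE := PySem.Dict.ofList curr_edges
  let prev_edge_ids : PySem.Set String := PySem.Set.ofList prevE.keys
  let curr_edge_ids : PySem.Set String := PySem.Set.ofList currE.keys
  let edges_added : List String := PySem.Set.diff curr_edge_ids prev_edge_ids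
  let edges_removed : List String := PySem.Set.diff prev_edge_ids curr_edge_ids
  let edges_modified : List String :=
    (PySem.Set.inter prev_edge_ids curr_edge_ids).foldl
      (fun acc edge_id =>
        if pyAttrNe (prevE.getD edge_id []) (currE.getD edge_id []) then acc ++ [edge_id] else acc) []
  [("nodes_added", PySem.List.sorted nodes_added (fun x => x) false),
   ("nodes_removed", PySem.List.sorted nodes_removed (fun x => x) false),
   ("nodes_modified", PySem.List.sorted nodes_modified (fun x => x) false),
   ("edges_added", PySem.List.sorted edges_added (fun x => x) false),
   ("edges_removed", PySem.List.sorted edges_removed (fun x => x) false),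
   ("edges_modified", PySem.List.sorted edges_modified (fun x => x) false)]

-- ===== PORT B =====
-- Source B's while loop with two pointers i, j over the sorted key lists, as the obvious recursion on
-- the two lists; ne k decides `prev[k] != curr[k]`; returns (added, removed, modified).
def altMerge (ne : String → Bool) : List String → List String → List String × List String × List String
  | [], ck => (ck, [], [])
  | a :: pk, [] => ([], a :: pk, [])
  | a :: pk, b :: ck =>
    if a < b then
      let r := altMerge ne pk (b :: ck); (r.1, a :: r.2.1, r.2.2)
    else if b < a then
      let r := altMerge ne (a :: pk) ck; (b :: r.1, r.2.1, r.2.2)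
    else
      let r := altMerge ne pk ck
      if ne a then (r.1, r.2.1, a :: r.2.2) else r
termination_by pk ck => pk.length + ck.length

-- Source B's merge_diff helper: sort both key lists, then merge
def altMergeDiff (prev curr : List (String × List (String × String))) :
    List String × List String × List String :=
  let p := PySem.Dict.ofList prev
  let c := PySem.Dict.ofList curr
  let pk := PySem.List.sorted p.keys (fun x => x) false
  let ck := PySem.List.sorted c.keys (fun x => x) false
  altMerge (fun k => pyAttrNe (p.getD k []) (c.getD k [])) pk ck

def compare_graph_states_py_alt (prev_nodes : List (String × List (String × String))) (prev_edges : List (String × List (String × String))) (curr_nodes : List (String × List (String × String))) (curr_edges : List (String × List (String × String))) : List (String × List String) :=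
  let n := altMergeDiff prev_nodes curr_nodes
  let e := altMergeDiff prev_edges curr_edges
  [("nodes_added", n.1), ("nodes_removed", n.2.1), ("nodes_modified", n.2.2),
   ("edges_added", e.1), ("edges_removed", e.2.1), ("edges_modified", e.2.2)]

-- ===== PRECONDITION & SPEC =====
def Spec_compare_graph_states_py (prev_nodes : List (String × List (String × String))) (prev_edges : List (String × List (String × String))) (curr_nodes : List (String × List (String × String))) (curr_edges : List (String × List (String × String))) (out : List (String × List String)) : Prop := out = compare_graph_states_py_alt prev_nodes prev_edges curr_nodes curr_edges
instance (prev_nodes : List (String × List (String × String))) (prev_edges : List (String × List (String × String))) (curr_nodes : List (String × List (String × String))) (curr_edges : List (String × List (String × String))) (out : List (String × List String)) : Decidable (Spec_compare_graph_states_py prev_nodes prev_edges curr_nodes curr_edges out) := by unfold Spec_compare_graph_states_py; infer_instance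

-- ===== CLAIM (what is proved, stated in full; the proofs are below) =====
def Claim_equal_compare_graph_states_py : Prop := ∀ (prev_nodes : List (String × List (String × String))) (prev_edges : List (String × List (String × String))) (curr_nodes : List (String × List (String × String))) (curr_edges : List (String × List (String × String))), Dom_compare_graph_states_py prev_nodes prev_edges curr_nodes curr_edges → Spec_compare_graph_states_py prev_nodes prev_edges curr_nodes curr_edges (compare_graph_states_py prev_nodes prev_edges curr_nodes curr_edges)

-- ===== LEMMAS AND PROOFS =====

-- the merge of two strictly increasing key lists computes the three filters
theorem altMerge_spec (ne : String → Bool) (sp sc : List String)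
    (hp : sp.Pairwise (· < ·)) (hc : sc.Pairwise (· < ·)) :
    altMerge ne sp sc =
      (sc.filter (fun b => !sp.contains b),
       sp.filter (fun a => !sc.contains a),
       sp.filter (fun a => sc.contains a && ne a)) := by
  fun_induction altMerge ne sp sc with
  | case1 ck => simp
  | case2 a pk => simp
  | case3 a pk b ck hab r ih =>
    obtain ⟨ha, hp'⟩ := List.pairwise_cons.mp hp
    have hbc := List.pairwise_cons.mp hc
    have hane : ∀ x ∈ b :: ck, x ≠ a := by
      intro x hx
      rcases List.mem_cons.mp hx with rfl | hx'
      · exact hab.ne'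
      · exact ((hab.trans (hbc.1 x hx'))).ne'
    have hnotin : (b :: ck).contains a = false := by
      simp only [List.contains_eq_mem, decide_eq_false_iff_not]
      intro hmem; exact hane a hmem rfl
    rw [show r = altMerge ne pk (b :: ck) from rfl, ih hp' hc]
    refine Prod.ext ?_ (Prod.ext ?_ ?_)
    · simp only
      apply List.filter_congr
      intro x hx
      simp [List.contains_eq_mem, List.mem_cons, hane x hx]
    · simp [List.filter_cons]
      exact ⟨hab.ne, fun hm => absurd rfl (hab.trans (hbc.1 a hm)).ne⟩
    · simp [List.filter_cons]
      rintro (rfl | hm)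
      · exact absurd rfl hab.ne
      · exact absurd rfl (hab.trans (hbc.1 a hm)).ne
  | case4 a pk b ck hab hba r ih =>
    have hpa := List.pairwise_cons.mp hp
    obtain ⟨hb, hc'⟩ := List.pairwise_cons.mp hc
    have hbne : ∀ x ∈ a :: pk, x ≠ b := by
      intro x hx
      rcases List.mem_cons.mp hx with rfl | hx'
      · exact hba.ne'
      · exact ((hba.trans (hpa.1 x hx'))).ne'
    have hnotin : (a :: pk).contains b = false := by
      simp only [List.contains_eq_mem, decide_eq_false_iff_not]
      intro hmem; exact hbne b hmem rfl
    rw [show r = altMerge ne (a :: pk) ck from rfl, ih hp hc']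
    refine Prod.ext ?_ (Prod.ext ?_ ?_)
    · simp [List.filter_cons]
      exact ⟨hba.ne, fun hm => absurd rfl (hba.trans (hpa.1 b hm)).ne⟩
    · simp only
      apply List.filter_congr
      intro x hx
      simp [List.contains_eq_mem, List.mem_cons, hbne x hx]
    · simp only
      apply List.filter_congr
      intro x hx
      simp [List.contains_eq_mem, List.mem_cons, hbne x hx]
  | case5 a pk b ck hab hba r hne ih =>
    have heq : a = b := le_antisymm (not_lt.mp hba) (not_lt.mp hab)
    subst heq
    obtain ⟨ha, hp'⟩ := List.pairwise_cons.mp hp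
    obtain ⟨hb, hc'⟩ := List.pairwise_cons.mp hc
    have hanec : ∀ x ∈ ck, x ≠ a := fun x hx => (hb x hx).ne'
    have hanep : ∀ x ∈ pk, x ≠ a := fun x hx => (ha x hx).ne'
    rw [show r = altMerge ne pk ck from rfl, ih hp' hc']
    refine Prod.ext ?_ (Prod.ext ?_ ?_)
    · simp only [List.filter_cons]
      have : ((a :: pk).contains a) = true := by simp
      simp only [this, Bool.not_true]
      simp only [if_neg Bool.false_ne_true]
      apply List.filter_congr
      intro x hx
      simp [List.contains_eq_mem, List.mem_cons, hanec x hx]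
    · simp only [List.filter_cons]
      have : ((a :: ck).contains a) = true := by simp
      simp only [this, Bool.not_true]
      simp only [if_neg Bool.false_ne_true]
      apply List.filter_congr
      intro x hx
      simp [List.contains_eq_mem, List.mem_cons, hanep x hx]
    · simp only [List.filter_cons]
      have hca : ((a :: ck).contains a) = true := by simp
      simp only [hca, Bool.true_and, hne, if_pos]
      congr 1
      apply List.filter_congr
      intro x hx
      simp [List.contains_eq_mem, List.mem_cons, hanep x hx]
  | case6 a pk b ck hab hba r hne ih =>
    have heq : a = b := le_antisymm (not_lt.mp hba) (not_lt.mp hab)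
    subst heq
    obtain ⟨ha, hp'⟩ := List.pairwise_cons.mp hp
    obtain ⟨hb, hc'⟩ := List.pairwise_cons.mp hc
    have hanec : ∀ x ∈ ck, x ≠ a := fun x hx => (hb x hx).ne'
    have hanep : ∀ x ∈ pk, x ≠ a := fun x hx => (ha x hx).ne'
    have hne' : ne a = false := by simpa using hne
    rw [show r = altMerge ne pk ck from rfl, ih hp' hc']
    refine Prod.ext ?_ (Prod.ext ?_ ?_)
    · simp only [List.filter_cons]
      have : ((a :: pk).contains a) = true := by simp
      simp only [this, Bool.not_true]
      simp only [if_neg Bool.false_ne_true]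
      apply List.filter_congr
      intro x hx
      simp [List.contains_eq_mem, List.mem_cons, hanec x hx]
    · simp only [List.filter_cons]
      have : ((a :: ck).contains a) = true := by simp
      simp only [this, Bool.not_true]
      simp only [if_neg Bool.false_ne_true]
      apply List.filter_congr
      intro x hx
      simp [List.contains_eq_mem, List.mem_cons, hanep x hx]
    · simp only [List.filter_cons]
      have hca : ((a :: ck).contains a) = true := by simp
      simp only [hca, Bool.true_and, hne', if_neg Bool.false_ne_true]
      apply List.filter_congr
      intro x hx
      simp [List.contains_eq_mem, List.mem_cons, hanep x hx]

-- the sorted key list of a dict built from a list is strictly increasing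
theorem sortedKeys_lt (l : List (String × List (String × String))) :
    (PySem.List.sorted (PySem.Dict.ofList l).keys (fun x => x) false).Pairwise (· < ·) := by
  have h := PySem.List.sorted_ofList_pairwise_lt (PySem.Dict.ofList l).keys
  rwa [PySem.Set.ofList_eq_self_of_nodup _ (PySem.Dict.nodup_keys_ofList l)] at h

theorem sortedKeys_nodup (l : List (String × List (String × String))) :
    (PySem.List.sorted (PySem.Dict.ofList l).keys (fun x => x) false).Nodup :=
  (PySem.List.sorted_perm _ _ _).nodup_iff.mpr (PySem.Dict.nodup_keys_ofList l)

theorem mem_sortedKeys (l : List (String × List (String × String))) (x : String) :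
    x ∈ PySem.List.sorted (PySem.Dict.ofList l).keys (fun x => x) false ↔
      x ∈ (PySem.Dict.ofList l).keys :=
  PySem.List.mem_sorted _ _ _ _

-- abbreviation used in the three per-category lemmas
theorem added_eq (prev curr : List (String × List (String × String))) :
    PySem.List.sorted
      (PySem.Set.diff (PySem.Set.ofList (PySem.Dict.ofList curr).keys)
        (PySem.Set.ofList (PySem.Dict.ofList prev).keys)) (fun x => x) false
    = (altMergeDiff prev curr).1 := by
  unfold altMergeDiff
  rw [altMerge_spec _ _ _ (sortedKeys_lt prev) (sortedKeys_lt curr)]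
  simp only
  rw [PySem.Set.ofList_eq_self_of_nodup _ (PySem.Dict.nodup_keys_ofList curr),
      PySem.Set.ofList_eq_self_of_nodup _ (PySem.Dict.nodup_keys_ofList prev)]
  apply PySem.List.sorted_eq_of_perm_of_pairwise_lt
  · apply (List.perm_ext_iff_of_nodup ((sortedKeys_nodup curr).filter _)
      (PySem.Set.nodup_diff _ _ (PySem.Dict.nodup_keys_ofList curr))).mpr
    intro x
    rw [List.mem_filter, PySem.Set.mem_diff, mem_sortedKeys]
    simp
  · exact (sortedKeys_lt curr).sublist List.filter_sublist

theorem removed_eq (prev curr : List (String × List (String × String))) :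
    PySem.List.sorted
      (PySem.Set.diff (PySem.Set.ofList (PySem.Dict.ofList prev).keys)
        (PySem.Set.ofList (PySem.Dict.ofList curr).keys)) (fun x => x) false
    = (altMergeDiff prev curr).2.1 := by
  unfold altMergeDiff
  rw [altMerge_spec _ _ _ (sortedKeys_lt prev) (sortedKeys_lt curr)]
  simp only
  rw [PySem.Set.ofList_eq_self_of_nodup _ (PySem.Dict.nodup_keys_ofList curr),
      PySem.Set.ofList_eq_self_of_nodup _ (PySem.Dict.nodup_keys_ofList prev)]
  apply PySem.List.sorted_eq_of_perm_of_pairwise_lt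
  · apply (List.perm_ext_iff_of_nodup ((sortedKeys_nodup prev).filter _)
      (PySem.Set.nodup_diff _ _ (PySem.Dict.nodup_keys_ofList prev))).mpr
    intro x
    rw [List.mem_filter, PySem.Set.mem_diff, mem_sortedKeys]
    simp
  · exact (sortedKeys_lt prev).sublist List.filter_sublist

theorem modified_eq (prev curr : List (String × List (String × String))) :
    PySem.List.sorted
      ((PySem.Set.inter (PySem.Set.ofList (PySem.Dict.ofList prev).keys)
          (PySem.Set.ofList (PySem.Dict.ofList curr).keys)).foldl
        (fun acc k =>
          if pyAttrNe ((PySem.Dict.ofList prev).getD k []) ((PySem.Dict.ofList curr).getD k []) then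
            acc ++ [k] else acc) []) (fun x => x) false
    = (altMergeDiff prev curr).2.2 := by
  unfold altMergeDiff
  rw [altMerge_spec _ _ _ (sortedKeys_lt prev) (sortedKeys_lt curr)]
  simp only
  rw [PySem.List.foldl_append_if
      (fun k => pyAttrNe ((PySem.Dict.ofList prev).getD k []) ((PySem.Dict.ofList curr).getD k []))
      (fun x => x)]
  simp only [List.nil_append, List.map_id']
  rw [PySem.Set.ofList_eq_self_of_nodup _ (PySem.Dict.nodup_keys_ofList prev),
      PySem.Set.ofList_eq_self_of_nodup _ (PySem.Dict.nodup_keys_ofList curr)]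
  apply PySem.List.sorted_eq_of_perm_of_pairwise_lt
  · apply (List.perm_ext_iff_of_nodup ((sortedKeys_nodup prev).filter _)
      ((PySem.Set.nodup_inter _ _ (PySem.Dict.nodup_keys_ofList prev)).filter _)).mpr
    intro x
    rw [List.mem_filter, List.mem_filter, PySem.Set.mem_inter, mem_sortedKeys]
    simp
    tauto
  · exact (sortedKeys_lt prev).sublist List.filter_sublist

-- ===== VERDICT (by name: the statement is the Claim_ definition above) =====
theorem compare_graph_states_py_spec : Claim_equal_compare_graph_states_py := by
  intro prev_nodes prev_edges curr_nodes curr_edges _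
  unfold Spec_compare_graph_states_py compare_graph_states_py compare_graph_states_py_alt
  simp only []
  rw [added_eq prev_nodes curr_nodes, removed_eq prev_nodes curr_nodes,
      modified_eq prev_nodes curr_nodes, added_eq prev_edges curr_edges,
      removed_eq prev_edges curr_edges, modified_eq prev_edges curr_edges]
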